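-- pv_equiv track=rewrite | github.com/p2k3m/NovaPDFReader | tools/scripts/verify_log_markers.py | _evaluate_requirements
-- ===== SOURCE A (Python) =====
-- from typing import Iterable, Sequence
--
-- def _evaluate_requirements(text: str, required: Sequence[str], groups: Sequence[Sequence[str]]) -> list[str]:
--     missing: list[str] = []
--
--     for needle in required:
--         if needle not in text:
--             missing.append(needle)
--
--     for group in groups:
--         if group and not any(candidate in text for candidate in group):
--             missing.append(" | ".join(group))
--
--     return missing
-- ===== SOURCE B (Python) =====
-- def _evaluate_requirements(text, required, groups):
--     # Index-based: collect all distinct patterns, and for each distinct pattern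
--     # length take the set of all substrings of text of that length, so each
--     # pattern's presence is a hash lookup instead of a text scan per pattern.
--     pats = list(dict.fromkeys(list(required) + [c for g in groups for c in g]))
--     lengths = set(len(p) for p in pats)
--     n = len(text)
--     found = set()
--     for L in lengths:
--         window = {text[i:i + L] for i in range(n - L + 1)}
--         found.update(p for p in pats if len(p) == L and p in window)
--     missing = [p for p in required if p not in found]
--     missing += [" | ".join(g) for g in groups if g and not any(c in found for c in g)]
--     return missing
-- ===== Notes on version B (the rewrite author's own statement) =====
-- stated objective: faster
-- what changed: Instead of scanning the text once per marker with 'in', B builds, for each distinct marker length L, the hash set of all length-L substrings of the text, so every marker's presence becomes one set lookup; the missing list is then emitted as filters in A's order.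
import Mathlib
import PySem

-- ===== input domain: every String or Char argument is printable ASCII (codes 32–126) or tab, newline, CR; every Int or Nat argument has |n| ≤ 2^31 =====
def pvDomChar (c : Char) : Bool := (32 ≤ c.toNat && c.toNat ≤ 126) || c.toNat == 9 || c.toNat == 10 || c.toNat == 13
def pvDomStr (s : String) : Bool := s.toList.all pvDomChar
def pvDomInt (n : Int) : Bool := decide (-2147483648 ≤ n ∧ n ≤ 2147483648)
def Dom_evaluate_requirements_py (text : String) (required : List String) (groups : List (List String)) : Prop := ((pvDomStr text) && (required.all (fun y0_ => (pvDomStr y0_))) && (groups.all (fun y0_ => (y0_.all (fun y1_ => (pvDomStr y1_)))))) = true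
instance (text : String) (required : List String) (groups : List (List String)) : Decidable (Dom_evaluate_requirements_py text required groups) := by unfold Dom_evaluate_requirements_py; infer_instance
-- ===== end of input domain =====

-- B replaces A's per-pattern scans of text by a substring index: for each distinct
-- pattern length one set of all of text's substrings of that length, so each
-- pattern's presence becomes a set lookup; the missing list is then emitted in A's order.

-- ===== PORT A =====
def evaluate_requirements_py (text : String) (required : List String) (groups : List (List String)) : List String :=
  let missing := required.foldl (fun acc needle =>
    if !(PySem.Str.isIn needle text) then acc ++ [needle] else acc) []
  groups.foldl (fun acc group =>
    if !group.isEmpty && !(group.any (fun candidate => PySem.Str.isIn candidate text)) then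
      acc ++ [PySem.Str.join " | " group]
    else acc) missing

-- ===== PORT B =====
-- window = {text[i:i+L] for i in range(n - L + 1)}
def pvWindow (text : String) (L : Int) : PySem.Set String :=
  PySem.Set.ofList ((PySem.List.pyRange 0 ((PySem.Str.len text) - L + 1) 1).map
    (fun i => PySem.Str.slice text (some i) (some (i + L))))

-- found = the subset of pats occurring in text, computed one pattern length at a time
def pvFound (text : String) (pats : List String) : PySem.Set String :=
  let lengths : PySem.Set Int := PySem.Set.ofList (pats.map (fun p => PySem.Str.len p))
  lengths.foldl (fun found L =>
    PySem.Set.update found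
      (pats.filter (fun p => PySem.Str.len p == L && PySem.Set.contains (pvWindow text L) p)))
    PySem.Set.empty

def evaluate_requirements_py_alt (text : String) (required : List String) (groups : List (List String)) : List String :=
  let pats := PySem.List.dedup (required ++ groups.flatten)
  let found := pvFound text pats
  (required.filter (fun p => !(PySem.Set.contains found p))) ++
    ((groups.filter (fun g => !g.isEmpty && !(g.any (fun c => PySem.Set.contains found c)))).map
      (fun g => PySem.Str.join " | " g))

-- ===== PRECONDITION & SPEC =====
def Spec_evaluate_requirements_py (text : String) (required : List String) (groups : List (List String)) (out : List String) : Prop := out = evaluate_requirements_py_alt text required groups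
instance (text : String) (required : List String) (groups : List (List String)) (out : List String) : Decidable (Spec_evaluate_requirements_py text required groups out) := by unfold Spec_evaluate_requirements_py; infer_instance

-- ===== CLAIM (what is proved, stated in full; the proofs are below) =====
def Claim_equal_evaluate_requirements_py : Prop := ∀ (text : String) (required : List String) (groups : List (List String)), Dom_evaluate_requirements_py text required groups → Spec_evaluate_requirements_py text required groups (evaluate_requirements_py text required groups)

-- ===== LEMMAS AND PROOFS =====

-- membership in the window of length L = occurrence as a slice of text
lemma mem_pvWindow (text : String) (L : Int) (q : String) :
    q ∈ pvWindow text L ↔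
      ∃ i : Int, (0 ≤ i ∧ i < (PySem.Str.len text) - L + 1) ∧
        PySem.Str.slice text (some i) (some (i + L)) = q := by
  unfold pvWindow
  rw [PySem.Set.mem_ofList]
  simp only [List.mem_map, PySem.List.mem_pyRange_one]

-- q occurs as a slice of its own length ↔ q is an infix of text
lemma window_iff_infix (text q : String) :
    q ∈ pvWindow text (PySem.Str.len q) ↔ q.toList <:+: text.toList := by
  rw [mem_pvWindow]
  constructor
  · rintro ⟨i, ⟨h0, h1⟩, hsl⟩
    have hq0 : (0:Int) ≤ PySem.Str.len q := by
      simp only [PySem.Str.len_eq]; exact Int.natCast_nonneg _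
    have := congrArg String.toList hsl
    rw [PySem.Str.toList_slice, PySem.Chars.slice_eq_listSlice,
        PySem.List.slice_toNat (ha := h0) (hb := by omega)] at this
    have htn : (i + PySem.Str.len q).toNat - i.toNat = q.toList.length := by
      simp only [PySem.Str.len_eq, String.length_toList] at *; omega
    rw [htn] at this
    have hpre : q.toList <+: (text.toList.drop i.toNat) := by
      rw [← this]; exact List.take_prefix _ _
    exact hpre.isInfix.trans (List.drop_suffix i.toNat text.toList).isInfix
  · rintro ⟨s, t, hst⟩
    have hlen : s.length + (q.toList.length + t.length) = text.toList.length := by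
      rw [← hst]; simp
    have hq0 : (0:Int) ≤ PySem.Str.len q := by
      simp only [PySem.Str.len_eq]; exact Int.natCast_nonneg _
    refine ⟨(s.length : Int), ⟨Int.natCast_nonneg _, ?_⟩, ?_⟩
    · simp only [PySem.Str.len_eq, String.length_toList] at *; omega
    · apply String.toList_inj.mp
      rw [PySem.Str.toList_slice, PySem.Chars.slice_eq_listSlice,
        PySem.List.slice_toNat (ha := Int.natCast_nonneg _) (hb := by omega)]
      have htn : ((s.length : Int) + PySem.Str.len q).toNat - ((s.length : Int)).toNat
          = q.toList.length := by
        simp only [PySem.Str.len_eq, String.length_toList] at *; omega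
      rw [htn, ← hst, Int.toNat_natCast]
      have hassoc : (s ++ q.toList ++ t) = s ++ (q.toList ++ t) := by simp
      rw [hassoc, List.drop_left, List.take_left']
      rfl

-- the per-length update loop, characterised
lemma mem_foldl_update (ls : List Int) (F : Int → List String) (s0 : PySem.Set String) (q : String) :
    q ∈ ls.foldl (fun f L => PySem.Set.update f (F L)) s0 ↔ q ∈ s0 ∨ ∃ L ∈ ls, q ∈ F L := by
  induction ls generalizing s0 with
  | nil => simp
  | cons L ls ih =>
    simp only [List.foldl_cons, ih, PySem.Set.mem_update, List.mem_cons]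
    constructor
    · rintro (⟨h | h⟩ | ⟨L', hL', h⟩)
      · exact Or.inl h
      · exact Or.inr ⟨L, Or.inl rfl, h⟩
      · exact Or.inr ⟨L', Or.inr hL', h⟩
    · rintro (h | ⟨L', (rfl | hL'), h⟩)
      · exact Or.inl (Or.inl h)
      · exact Or.inl (Or.inr h)
      · exact Or.inr ⟨L', hL', h⟩

-- for a pattern of pats, the found set answers exactly 'needle in text'
lemma contains_pvFound (text : String) (pats : List String) (q : String) (hq : q ∈ pats) :
    PySem.Set.contains (pvFound text pats) q = PySem.Str.isIn q text := by
  rw [Bool.eq_iff_iff, PySem.Set.contains_iff, PySem.Str.isIn_iff_infix]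
  unfold pvFound
  simp only [mem_foldl_update]
  constructor
  · rintro (h | ⟨L, _, h⟩)
    · simp [PySem.Set.empty] at h
    · rw [List.mem_filter] at h
      obtain ⟨-, h⟩ := h
      rw [Bool.and_eq_true, beq_iff_eq] at h
      obtain ⟨hL, h⟩ := h
      rw [PySem.Set.contains_iff] at h
      rw [← window_iff_infix]
      rwa [hL]
  · intro h
    refine Or.inr ⟨PySem.Str.len q, ?_, ?_⟩
    · rw [PySem.Set.mem_ofList]; exact List.mem_map.mpr ⟨q, hq, rfl⟩
    · rw [List.mem_filter]
      refine ⟨hq, ?_⟩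
      rw [Bool.and_eq_true, beq_iff_eq]
      refine ⟨rfl, ?_⟩
      rw [PySem.Set.contains_iff]
      exact (window_iff_infix text q).mpr h

-- ===== VERDICT (by name: the statement is the Claim_ definition above) =====
theorem evaluate_requirements_py_spec : Claim_equal_evaluate_requirements_py := by
  intro text required groups _
  unfold Spec_evaluate_requirements_py evaluate_requirements_py evaluate_requirements_py_alt
  simp only [PySem.List.foldl_append_if_eq_filter, PySem.List.foldl_append_if, List.nil_append]
  have hmem : ∀ p : String, p ∈ required ++ groups.flatten →
      PySem.Set.contains (pvFound text (PySem.List.dedup (required ++ groups.flatten))) p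
        = PySem.Str.isIn p text := by
    intro p hp
    exact contains_pvFound text _ p (by rw [PySem.List.mem_dedup]; exact hp)
  congr 1
  · apply List.filter_congr
    intro x hx
    rw [hmem x (List.mem_append.mpr (Or.inl hx))]
  · apply congrArg (List.map _)
    apply List.filter_congr
    intro g hg
    have : (g.any fun candidate => PySem.Str.isIn candidate text)
        = (g.any fun c => PySem.Set.contains (pvFound text (PySem.List.dedup (required ++ groups.flatten))) c) := by
      apply PySem.List.any_congr_mem
      intro c hc
      exact (hmem c (List.mem_append.mpr (Or.inr (List.mem_flatten.mpr ⟨g, hg, hc⟩)))).symm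
    rw [this]
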